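-- pv_equiv track=rewrite | github.com/rajshivendra2026/TraceMAP-RCA-Workbench | src/parser/diameter_parser.py | _extract_subscription_ids
-- ===== SOURCE A (Python) =====
-- from typing import Optional
--
-- def _extract_subscription_ids(raw: dict) -> tuple[Optional[str], Optional[str]]:
--     sub_id_raw = raw.get("diameter.Subscription-Id-Data")
--
--     values: list[str] = []
--     if isinstance(sub_id_raw, list):
--         values = [str(v).strip() for v in sub_id_raw if str(v).strip()]
--     elif sub_id_raw not in (None, ""):
--         values = [str(sub_id_raw).strip()]
--
--     imsi = None
--     msisdn = None
--     for value in values: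
--         digits = value.replace("+", "").strip()
--         if digits.isdigit() and len(digits) >= 14 and imsi is None:
--             imsi = digits
--         elif digits and msisdn is None:
--             msisdn = digits
--
--     if imsi is None and values:
--         imsi = values[0]
--     if msisdn is None and len(values) > 1:
--         msisdn = values[1]
--
--     return imsi, msisdn
-- ===== SOURCE B (Python) =====
-- from typing import Optional
--
--
-- def _split_first_imsi(ds: list[str]) -> tuple[Optional[str], list[str]]:
--     """Return (first all-digit string of length >= 14, the list without it)."""
--     for i, d in enumerate(ds):
--         if d.isdigit() and len(d) >= 14:
--             return d, ds[:i] + ds[i + 1:]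
--     return None, ds
--
--
-- def _extract_subscription_ids(raw: dict) -> tuple[Optional[str], Optional[str]]:
--     sub_id_raw = raw.get("diameter.Subscription-Id-Data")
--
--     values: list[str] = []
--     if isinstance(sub_id_raw, list):
--         values = [str(v).strip() for v in sub_id_raw if str(v).strip()]
--     elif sub_id_raw not in (None, ""):
--         values = [str(sub_id_raw).strip()]
--
--     digits_list = [v.replace("+", "").strip() for v in values]
--
--     imsi, rest = _split_first_imsi(digits_list)
--     if imsi is None and values:
--         imsi = values[0]
--
--     msisdn = next((d for d in rest if d), None)
--     if msisdn is None and len(values) > 1: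
--         msisdn = values[1]
--
--     return imsi, msisdn
-- ===== Notes on version B (the rewrite author's own statement) =====
-- stated objective: alternative
-- what changed: Replaces A's single stateful if/elif loop over (imsi, msisdn) by a different decomposition: split the stripped-digits list at its first all-digit length>=14 entry (that is the imsi), then take the first nonempty entry of the remainder as msisdn, with the same positional fallbacks.
import Mathlib
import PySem

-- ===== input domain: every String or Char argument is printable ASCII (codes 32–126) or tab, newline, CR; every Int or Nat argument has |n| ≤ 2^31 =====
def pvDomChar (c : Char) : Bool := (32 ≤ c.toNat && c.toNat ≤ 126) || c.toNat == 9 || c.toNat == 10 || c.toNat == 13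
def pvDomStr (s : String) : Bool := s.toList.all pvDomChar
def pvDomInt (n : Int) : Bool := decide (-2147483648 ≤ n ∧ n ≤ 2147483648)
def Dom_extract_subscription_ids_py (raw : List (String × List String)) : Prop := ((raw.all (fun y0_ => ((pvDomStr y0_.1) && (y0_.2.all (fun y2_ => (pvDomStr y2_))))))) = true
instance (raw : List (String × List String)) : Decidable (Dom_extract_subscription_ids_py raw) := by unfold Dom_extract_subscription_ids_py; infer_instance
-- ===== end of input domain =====

-- B replaces A's single stateful if/elif loop by a split at the first qualifying IMSI value
-- plus an index-free first-nonempty search over the remainder (different decomposition, same cost).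

-- shared: both Pythons build `values` with the identical comprehension
-- [str(v).strip() for v in sub_id_raw if str(v).strip()]  (under the type convention the
-- dict value is always a list of strings, so the isinstance-list branch is the one taken)
def pvValues (raw : List (String × List String)) : List String :=
  match (PySem.Dict.mk raw).get? "diameter.Subscription-Id-Data" with
  | some l => l.filterMap (fun v => let s := PySem.Str.strip v; if s ≠ "" then some s else none)
  | none => []

-- ===== PORT A =====
-- digits = value.replace("+", "").strip()
def pvDigits (value : String) : String := PySem.Str.strip (PySem.Str.replace value "+" "")

-- one step of A's for-loop over `values`, state (imsi, msisdn)
def pvStepA (st : Option String × Option String) (value : String) : Option String × Option String :=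
  let digits := pvDigits value
  if PySem.Str.strIsdigit digits && decide (14 ≤ PySem.Str.len digits) && st.1.isNone then
    (some digits, st.2)
  else if decide (digits ≠ "") && st.2.isNone then
    (st.1, some digits)
  else st

def extract_subscription_ids_py (raw : List (String × List String)) : Option String × Option String :=
  let values := pvValues raw
  let r := values.foldl pvStepA (none, none)
  let imsi := if r.1.isNone && decide (values ≠ []) then values[0]? else r.1
  let msisdn := if r.2.isNone && decide (1 < values.length) then values[1]? else r.2
  (imsi, msisdn)

-- ===== PORT B =====
def pvQuali (d : String) : Bool := PySem.Str.strIsdigit d && decide (14 ≤ PySem.Str.len d)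

-- _split_first_imsi: first all-digit string of length >= 14, and the list without it
def pvSplit (ds : List String) : Option String × List String :=
  match ds with
  | [] => (none, [])
  | d :: t =>
    if pvQuali d then (some d, t)
    else
      let r := pvSplit t
      (r.1, d :: r.2)

def extract_subscription_ids_py_alt (raw : List (String × List String)) : Option String × Option String :=
  let values := pvValues raw
  let digits_list := values.map pvDigits
  let s := pvSplit digits_list
  let imsi := if s.1.isNone && decide (values ≠ []) then values[0]? else s.1
  let msisdn0 := s.2.find? (fun d => decide (d ≠ ""))
  let msisdn := if msisdn0.isNone && decide (1 < values.length) then values[1]? else msisdn0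
  (imsi, msisdn)

-- ===== PRECONDITION & SPEC =====
def Spec_extract_subscription_ids_py (raw : List (String × List String)) (out : Option String × Option String) : Prop := out = extract_subscription_ids_py_alt raw
instance (raw : List (String × List String)) (out : Option String × Option String) : Decidable (Spec_extract_subscription_ids_py raw out) := by unfold Spec_extract_subscription_ids_py; infer_instance

-- ===== CLAIM (what is proved, stated in full; the proofs are below) =====
def Claim_equal_extract_subscription_ids_py : Prop := ∀ (raw : List (String × List String)), Dom_extract_subscription_ids_py raw → Spec_extract_subscription_ids_py raw (extract_subscription_ids_py raw)

-- ===== LEMMAS AND PROOFS =====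

-- A's step with its condition folded into pvQuali (definitional)
theorem stepA_char (st : Option String × Option String) (v : String) :
    pvStepA st v =
      (if pvQuali (pvDigits v) && st.1.isNone then (some (pvDigits v), st.2)
       else if decide (pvDigits v ≠ "") && st.2.isNone then (st.1, some (pvDigits v)) else st) := rfl

theorem pvQuali_empty : pvQuali "" = false := by decide

-- once both slots are filled the loop is inert
theorem foldl_stepA_some_some (vs : List String) (x m : String) :
    vs.foldl pvStepA (some x, some m) = (some x, some m) := by
  induction vs with
  | nil => rfl
  | cons v t ih =>
    rw [List.foldl_cons, stepA_char]
    generalize pvDigits v = d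
    simpa using ih

-- imsi found, msisdn still open: msisdn becomes the first nonempty digits of the rest
theorem foldl_stepA_some_none (vs : List String) (x : String) :
    vs.foldl pvStepA (some x, none) =
      (some x, (vs.map pvDigits).find? (fun d => decide (d ≠ ""))) := by
  induction vs with
  | nil => rfl
  | cons v t ih =>
    rw [List.foldl_cons, stepA_char, List.map_cons]
    generalize pvDigits v = d
    by_cases h : d = ""
    · subst h
      simp [List.find?, ih]
    · simp [h, List.find?, foldl_stepA_some_some]

-- msisdn taken, imsi still open: imsi becomes the first qualifying digits of the rest
theorem foldl_stepA_none_some (vs : List String) (m : String) :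
    vs.foldl pvStepA (none, some m) = ((pvSplit (vs.map pvDigits)).1, some m) := by
  induction vs with
  | nil => rfl
  | cons v t ih =>
    rw [List.foldl_cons, stepA_char, List.map_cons]
    generalize pvDigits v = d
    by_cases hq : pvQuali d
    · simp [hq, foldl_stepA_some_some, pvSplit]
    · by_cases h0 : d = ""
      · subst h0
        simp [pvQuali_empty, ih, pvSplit]
      · simp [hq, h0, ih, pvSplit]

-- main loop characterisation: A's interleaved loop = B's split + first-nonempty search
theorem foldl_stepA_none_none (vs : List String) :
    vs.foldl pvStepA (none, none) =
      ((pvSplit (vs.map pvDigits)).1,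
       (pvSplit (vs.map pvDigits)).2.find? (fun d => decide (d ≠ ""))) := by
  induction vs with
  | nil => rfl
  | cons v t ih =>
    rw [List.foldl_cons, stepA_char, List.map_cons]
    generalize pvDigits v = d
    by_cases hq : pvQuali d
    · simp [hq, foldl_stepA_some_none, pvSplit]
    · by_cases h0 : d = ""
      · subst h0
        simp [pvQuali_empty, ih, pvSplit]
      · simp [hq, h0, foldl_stepA_none_some, pvSplit]

-- ===== VERDICT (by name: the statement is the Claim_ definition above) =====
theorem extract_subscription_ids_py_spec : Claim_equal_extract_subscription_ids_py := by
  intro raw _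
  unfold Spec_extract_subscription_ids_py extract_subscription_ids_py extract_subscription_ids_py_alt
  simp [foldl_stepA_none_none]
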